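-- pv_equiv track=rewrite | github.com/irfan7787/TextCipher | doubleTrasnpositionCipher.py | double_transposition_encrypt
-- ===== SOURCE A (Python) =====
-- import math
--
-- def double_transposition_encrypt(text, key1, key2):
--     """
--     Encrypt or decrypt the given text using the Double Transposition Cipher.
--
--     Args:
--         text (str): The text to be encrypted or decrypted.
--         key1 (int): The first encryption key.
--         key2 (int): The second encryption key.
--
--
--     Returns:
--         str: The encrypted  text.
--     """
--
--     # Convert the keys to lists of digits
--     key1 = [int(digit) for digit in str(key1)]
--     key2 = [int(digit) for digit in str(key2)]
--
--     # Calculate the dimensions of the grid based on the length of the text and the keys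
--     rows = math.ceil(len(text) / len(key1))
--     cols = len(key1)
--
--     # Pad the text with x characters to make it fit the grid
--     padded_text = text.ljust(rows * cols, '_')
--
--     # Create the grid
--     grid = []
--     for i in range(rows):
--         row = [padded_text[j] for j in range(i * cols, (i + 1) * cols)]
--         grid.append(row)
--
--     # transpose of grid
--     grid = list(map(list, zip(*grid)))
--
--     grid1 = [grid[i-1] for i in key1]
--
--     # transpose of grid
--     grid12 = list(map(list, zip(*grid1)))
--
--     grid2 = [grid12[i-1] for i in key2]
--
--     # Flatten the grid into a string
--     result = ''.join([char for row in grid2 for char in row])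
--
--     # Return the encrypted or encrypted text
--     return result
-- ===== SOURCE B (Python) =====
-- import math
--
-- def double_transposition_encrypt(text, key1, key2):
--     # Compose the column and row permutations directly and read the padded
--     # text once, instead of building, transposing and reordering grids.
--     d1 = [int(digit) for digit in str(key1)]
--     d2 = [int(digit) for digit in str(key2)]
--     cols = len(d1)
--     rows = math.ceil(len(text) / cols)
--     padded = text.ljust(rows * cols, '_')
--     ci = list(range(cols))
--     ri = list(range(rows))
--     col_map = [ci[d - 1] for d in d1]
--     row_map = [ri[d - 1] for d in d2]
--     return ''.join(padded[r * cols + c] for r in row_map for c in col_map)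
-- ===== Notes on version B (the rewrite author's own statement) =====
-- stated objective: simpler
-- what changed: B composes the column and row permutations once and reads each output character directly from the padded text by index, instead of building a grid, transposing it, reordering, transposing again and reordering again.
import Mathlib
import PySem

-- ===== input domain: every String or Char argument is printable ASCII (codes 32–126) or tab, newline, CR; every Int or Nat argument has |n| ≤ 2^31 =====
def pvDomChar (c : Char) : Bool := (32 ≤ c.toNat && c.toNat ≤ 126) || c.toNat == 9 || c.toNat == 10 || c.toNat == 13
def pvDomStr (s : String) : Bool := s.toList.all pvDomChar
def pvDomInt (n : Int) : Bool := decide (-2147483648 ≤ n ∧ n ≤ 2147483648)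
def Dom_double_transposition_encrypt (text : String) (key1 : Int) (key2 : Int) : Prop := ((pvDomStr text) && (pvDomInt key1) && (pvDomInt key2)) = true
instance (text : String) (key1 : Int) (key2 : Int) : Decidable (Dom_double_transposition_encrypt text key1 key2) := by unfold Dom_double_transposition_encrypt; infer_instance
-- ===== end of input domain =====

-- B composes the column and row permutations once and reads each output character
-- directly from the padded text by index, instead of A's grid build / transpose /
-- reorder / transpose / reorder pipeline (objective: simpler, same cost).

-- shared helper: [int(digit) for digit in str(key)]; exact when str(key) is all
-- decimal digits (key ≥ 0, which Pre_ guarantees; int('-') raises in Python)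
def pyDigits (n : Int) : List Int :=
  (PySem.Int.toChars n).map (fun c => (c.toNat : Int) - 48)

-- ===== PORT A =====
-- zip(*g) for a list of rows: truncates to the shortest row; the getD default is
-- never read since j < every row's length
def zipStar (g : List (List Char)) : List (List Char) :=
  match (g.map List.length).min? with
  | none => []
  | some m => (List.range m).map (fun j => g.map (fun row => row.getD j '_'))

def double_transposition_encrypt (text : String) (key1 : Int) (key2 : Int) : String :=
  let k1 := pyDigits key1
  let k2 := pyDigits key2
  let cols := k1.length
  -- math.ceil(len(text) / cols): exact for realistic string lengths (< 2^52)
  let rows := (text.toList.length + cols - 1) / cols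
  -- text.ljust(rows * cols, '_')
  let padded := text.toList ++ List.replicate (rows * cols - text.toList.length) '_'
  -- grid rows: [padded[j] for j in range(i*cols, (i+1)*cols)]; index always in range
  let grid := (List.range rows).map (fun i =>
    (List.range' (i * cols) cols).map (fun j => padded.getD j '_'))
  let gridT := zipStar grid
  let grid1 := k1.map (fun d => (PySem.List.pyGet? gridT (d - 1)).getD [])
  let grid12 := zipStar grid1
  let grid2 := k2.map (fun d => (PySem.List.pyGet? grid12 (d - 1)).getD [])
  String.ofList grid2.flatten

-- ===== PORT B =====
def double_transposition_encrypt_alt (text : String) (key1 : Int) (key2 : Int) : String :=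
  let d1 := pyDigits key1
  let d2 := pyDigits key2
  let cols := d1.length
  -- math.ceil(len(text) / cols): exact for realistic string lengths (< 2^52)
  let rows := (text.toList.length + cols - 1) / cols
  -- text.ljust(rows * cols, '_')
  let padded := text.toList ++ List.replicate (rows * cols - text.toList.length) '_'
  let ci := PySem.List.pyRange 0 (cols : Int) 1
  let ri := PySem.List.pyRange 0 (rows : Int) 1
  let colMap := d1.map (fun d => (PySem.List.pyGet? ci (d - 1)).getD 0)
  let rowMap := d2.map (fun d => (PySem.List.pyGet? ri (d - 1)).getD 0)
  String.ofList (rowMap.flatMap (fun r =>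
    colMap.map (fun c => (PySem.List.pyGet? padded (r * (cols : Int) + c)).getD '_')))

-- ===== PRECONDITION & SPEC =====
-- Pre_ excludes exactly the inputs on which A raises: a negative key (int('-') is a
-- ValueError), an empty text (rows = 0, so the first grid reordering indexes an empty
-- list), or a key digit d whose index d-1 is out of range for the cols (key1) resp.
-- rows (key2) many rows being reordered (IndexError). B raises on the same inputs.
def Pre_double_transposition_encrypt (text : String) (key1 : Int) (key2 : Int) : Prop :=
  0 ≤ key1 ∧ 0 ≤ key2 ∧ text.toList ≠ [] ∧
  (∀ d ∈ pyDigits key1, 0 ≤ d ∧ d ≤ ((pyDigits key1).length : Int)) ∧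
  (∀ d ∈ pyDigits key2, 0 ≤ d ∧
    d ≤ (((text.toList.length + (pyDigits key1).length - 1) / (pyDigits key1).length : Nat) : Int))
instance (text : String) (key1 : Int) (key2 : Int) : Decidable (Pre_double_transposition_encrypt text key1 key2) := by
  unfold Pre_double_transposition_encrypt; infer_instance

def pvWitness_double_transposition_encrypt : String × Int × Int := ("attackatdawn", 312, 21)

def Spec_double_transposition_encrypt (text : String) (key1 : Int) (key2 : Int) (out : String) : Prop := out = double_transposition_encrypt_alt text key1 key2
instance (text : String) (key1 : Int) (key2 : Int) (out : String) : Decidable (Spec_double_transposition_encrypt text key1 key2 out) := by unfold Spec_double_transposition_encrypt; infer_instance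

-- ===== CLAIM (what is proved, stated in full; the proofs are below) =====
def Claim_equal_double_transposition_encrypt : Prop := ∀ (text : String) (key1 : Int) (key2 : Int), Dom_double_transposition_encrypt text key1 key2 → Pre_double_transposition_encrypt text key1 key2 → Spec_double_transposition_encrypt text key1 key2 (double_transposition_encrypt text key1 key2)

-- ===== LEMMAS AND PROOFS =====

-- the minimum of a nonempty constant list
lemma min?_replicate (k c : Nat) (h : k ≠ 0) : (List.replicate k c).min? = some c := by
  cases k with
  | zero => omega
  | succ m =>
    induction m with
    | zero => rfl
    | succ i ih => simp_all [List.replicate_succ]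

-- zip(*·) of a list of equal-length rows given by a function is the transposed grid
lemma zipStar_rows {ι : Type} (l : List ι) (m : Nat) (h : l ≠ []) (f : ι → Nat → Char) :
    zipStar (l.map fun x => (List.range m).map fun i => f x i)
      = (List.range m).map fun i => l.map fun x => f x i := by
  unfold zipStar
  have h1 : ((l.map fun x => (List.range m).map fun i => f x i).map List.length)
      = List.replicate l.length m := by simp [Function.comp_def]
  rw [h1, min?_replicate l.length m (fun hh => h (List.length_eq_zero_iff.mp hh))]
  apply List.map_congr_left
  intro j hj
  rw [List.map_map]
  apply List.map_congr_left
  intro x _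
  exact PySem.List.getD_map_range (f x) m j '_' (List.mem_range.mp hj)

-- selecting index d-1 (0 ≤ d ≤ n, 0 < n) from a length-n list given as a map over range:
-- digit 0 wraps to the last element, d ≥ 1 picks element d-1
lemma pyGet_map_range {α : Type} (n : Nat) (hn : 0 < n) (g : Nat → α) (d : Int)
    (h0 : 0 ≤ d) (h1 : d ≤ (n : Int)) (dflt : α) :
    (PySem.List.pyGet? ((List.range n).map g) (d - 1)).getD dflt
      = g (if d = 0 then n - 1 else d.toNat - 1) := by
  by_cases hd : d = 0
  · subst hd
    rw [show (0 - 1 : Int) = -1 by norm_num, PySem.List.pyGet?_neg_one]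
    rw [List.getLast?_eq_getElem?]
    simp [Nat.sub_lt hn]
  · rw [PySem.List.pyGet?_of_nonneg _ (show (0 : Int) ≤ d - 1 by omega)]
    have hlt : (d - 1).toNat < n := by omega
    rw [if_neg hd]
    simp only [List.getElem?_map, List.getElem?_range, hlt]
    simp only [Option.map_some, Option.getD_some]
    congr 1
    omega

-- the main list-level equality, in the non-degenerate case cols ≥ 1
set_option maxHeartbeats 1000000 in
lemma main_eq (text : String) (key1 key2 : Int)
    (hc : 0 < (pyDigits key1).length)
    (ht : text.toList ≠ [])
    (hb1 : ∀ d ∈ pyDigits key1, 0 ≤ d ∧ d ≤ ((pyDigits key1).length : Int))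
    (hb2 : ∀ d ∈ pyDigits key2, 0 ≤ d ∧
      d ≤ (((text.toList.length + (pyDigits key1).length - 1) / (pyDigits key1).length : Nat) : Int)) :
    double_transposition_encrypt text key1 key2
      = double_transposition_encrypt_alt text key1 key2 := by
  simp only [double_transposition_encrypt, double_transposition_encrypt_alt]
  congr 1
  generalize hk1g : pyDigits key1 = k1 at *
  generalize hk2g : pyDigits key2 = k2 at *
  set cols := k1.length with hcols
  set n := text.toList.length with hn
  have hn1 : 0 < n := List.length_pos_iff.mpr ht
  set rows := (n + cols - 1) / cols with hrows
  have hr : 0 < rows := Nat.div_pos (by omega) hc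
  set P := text.toList ++ List.replicate (rows * cols - n) '_' with hPdef
  set cidx : Int → Nat := fun d => if d = 0 then cols - 1 else d.toNat - 1 with hcidx
  set ridx : Int → Nat := fun d => if d = 0 then rows - 1 else d.toNat - 1 with hridx
  -- ==== A side ====
  have hgrid : (List.range rows).map (fun i =>
        (List.range' (i * cols) cols).map (fun j => P.getD j '_'))
      = (List.range rows).map (fun i =>
        (List.range cols).map (fun j => P.getD (i * cols + j) '_')) := by
    apply List.map_congr_left
    intro i _
    rw [List.range'_eq_map_range, List.map_map]
    rfl
  rw [hgrid]
  rw [zipStar_rows (List.range rows) cols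
      (by simp [List.range_eq_nil]; omega) (fun i j => P.getD (i * cols + j) '_')]
  have hgrid1 : k1.map (fun d =>
        (PySem.List.pyGet? ((List.range cols).map fun j =>
          (List.range rows).map fun i => P.getD (i * cols + j) '_') (d - 1)).getD [])
      = k1.map (fun d => (List.range rows).map fun i => P.getD (i * cols + cidx d) '_') := by
    apply List.map_congr_left
    intro d hd
    obtain ⟨hd0, hd1⟩ := hb1 d hd
    exact pyGet_map_range cols hc _ d hd0 hd1 []
  rw [hgrid1]
  rw [zipStar_rows k1 rows (List.length_pos_iff.mp hc)
      (fun d i => P.getD (i * cols + cidx d) '_')]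
  have hgrid2 : k2.map (fun d =>
        (PySem.List.pyGet? ((List.range rows).map fun i =>
          k1.map fun d' => P.getD (i * cols + cidx d') '_') (d - 1)).getD [])
      = k2.map (fun d => k1.map fun d' => P.getD (ridx d * cols + cidx d') '_') := by
    apply List.map_congr_left
    intro d hd
    obtain ⟨hd0, hd1⟩ := hb2 d hd
    exact pyGet_map_range rows hr _ d hd0 hd1 []
  rw [hgrid2]
  -- ==== B side ====
  have hci : PySem.List.pyRange 0 (cols : Int) 1
      = (List.range cols).map (fun k : Nat => (k : Int)) := by
    rw [PySem.List.pyRange_one]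
    rw [show ((cols : Int) - 0).toNat = cols by omega]
    exact List.map_congr_left fun k _ => by omega
  have hri : PySem.List.pyRange 0 (rows : Int) 1
      = (List.range rows).map (fun k : Nat => (k : Int)) := by
    rw [PySem.List.pyRange_one]
    rw [show ((rows : Int) - 0).toNat = rows by omega]
    exact List.map_congr_left fun k _ => by omega
  rw [hci, hri]
  have hcolMap : k1.map (fun d =>
        (PySem.List.pyGet? ((List.range cols).map (fun k : Nat => (k : Int))) (d - 1)).getD 0)
      = k1.map (fun d => ((cidx d : Nat) : Int)) := by
    apply List.map_congr_left
    intro d hd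
    obtain ⟨hd0, hd1⟩ := hb1 d hd
    exact pyGet_map_range cols hc _ d hd0 hd1 0
  have hrowMap : k2.map (fun d =>
        (PySem.List.pyGet? ((List.range rows).map (fun k : Nat => (k : Int))) (d - 1)).getD 0)
      = k2.map (fun d => ((ridx d : Nat) : Int)) := by
    apply List.map_congr_left
    intro d hd
    obtain ⟨hd0, hd1⟩ := hb2 d hd
    exact pyGet_map_range rows hr _ d hd0 hd1 0
  rw [hcolMap, hrowMap]
  -- ==== both sides are the same double flatMap over the padded text ====
  rw [← List.flatMap_def, List.flatMap_map]
  congr 1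
  funext d
  rw [List.map_map]
  congr 1
  funext d'
  simp only [Function.comp]
  rw [show ((ridx d : Nat) : Int) * (cols : Int) + ((cidx d' : Nat) : Int)
      = ((ridx d * cols + cidx d' : Nat) : Int) by push_cast; ring]
  rw [PySem.List.pyGet?_natCast]
  rw [List.getD_eq_getElem?_getD]

-- ===== VERDICT (by name: the statement is the Claim_ definition above) =====
set_option maxHeartbeats 1000000 in
theorem double_transposition_encrypt_spec : Claim_equal_double_transposition_encrypt := by
  intro text key1 key2 _ hpre
  obtain ⟨hk1, hk2, htext, hb1, hb2⟩ := hpre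
  unfold Spec_double_transposition_encrypt
  by_cases hc : (pyDigits key1).length = 0
  · have hnil : pyDigits key1 = [] := List.length_eq_zero_iff.mp hc
    have hg : ∀ d : Int, PySem.List.pyGet? ([] : List (List Char)) (d - 1) = none := fun d => by
      rw [PySem.List.pyGet?_eq_none_iff]
      simp [PySem.Raise.InRange]
    have hg2 : ∀ d : Int, PySem.List.pyGet? ([] : List Int) (d - 1) = none := fun d => by
      rw [PySem.List.pyGet?_eq_none_iff]
      simp [PySem.Raise.InRange]
    simp [double_transposition_encrypt, double_transposition_encrypt_alt, hnil, zipStar,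
      PySem.List.pyRange_one_eq_nil, hg, hg2, List.flatMap_def]
  · exact main_eq text key1 key2 (Nat.pos_of_ne_zero hc) htext hb1 hb2
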